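-- pv_equiv track=rewrite | github.com/aistovaai/algorithms | 1/3.py | are_reachable
-- ===== SOURCE A (Python) =====
-- def are_reachable(adj_list, v, u):
--     def dfs(start, target, visited):
--         if start == target:
--             return True
--         visited.add(start)
--         for neighbor in adj_list.get(start, []):
--             if neighbor not in visited:
--                 if dfs(neighbor, target, visited):
--                     return True
--         return False
--
--     # Проверяем достижимость из v в u
--     visited_from_v = set()
--     reachable_from_v = dfs(v, u, visited_from_v)
--
--     # Проверяем достижимость из u в v
--     visited_from_u = set()
--     reachable_from_u = dfs(u, v, visited_from_u)
--
--     return reachable_from_v and reachable_from_u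
-- ===== SOURCE B (Python) =====
-- def are_reachable(adj_list, v, u):
--     def reachable(start, target):
--         stack = [start]
--         visited = set()
--         while stack:
--             node = stack.pop()
--             if node == target:
--                 return True
--             if node in visited:
--                 continue
--             visited.add(node)
--             for neighbor in adj_list.get(node, []):
--                 if neighbor not in visited:
--                     stack.append(neighbor)
--         return False
--
--     return reachable(v, u) and reachable(u, v)
-- ===== Notes on version B (the rewrite author's own statement) =====
-- stated objective: alternative
-- what changed: Replaces A's recursive DFS with a shared mutable visited set by an iterative DFS over an explicit stack, with the target checked when a node is popped; the two reachability probes are combined the same way.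
import Mathlib
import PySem

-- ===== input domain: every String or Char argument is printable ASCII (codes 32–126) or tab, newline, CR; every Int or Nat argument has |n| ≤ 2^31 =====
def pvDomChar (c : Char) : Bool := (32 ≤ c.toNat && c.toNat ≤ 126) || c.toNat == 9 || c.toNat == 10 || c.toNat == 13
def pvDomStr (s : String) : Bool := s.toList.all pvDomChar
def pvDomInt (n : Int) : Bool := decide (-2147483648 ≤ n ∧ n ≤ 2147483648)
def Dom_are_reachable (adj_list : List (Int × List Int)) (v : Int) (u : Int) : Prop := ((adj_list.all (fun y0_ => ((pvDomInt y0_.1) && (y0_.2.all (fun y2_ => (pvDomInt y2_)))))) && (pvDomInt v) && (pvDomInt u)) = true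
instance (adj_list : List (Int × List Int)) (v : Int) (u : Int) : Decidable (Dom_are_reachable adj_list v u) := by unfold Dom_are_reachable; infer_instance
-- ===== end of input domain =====

-- B replaces A's recursive DFS by an iterative explicit-stack DFS (target checked on pop); return value only, same result.

-- adj_list.get(node, []) for both ports (dict → association list, first match)
def pvNbrs (adj : List (Int × List Int)) (s : Int) : List Int :=
  (PySem.Dict.mk adj).getD s []

-- ===== PORT A =====
-- A's inner `dfs` is recursive with a shared mutable `visited`; ported with the visited set
-- threaded through, plus a fuel argument that only makes the recursion structural (the
-- recursion depth is at most the number of distinct keys + 1, so fuel adj_list.length + 1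
-- is never exhausted; proved as part of the spec lemmas below).
mutual
def pvDfsA (adj : List (Int × List Int)) (target : Int) (fuel : ℕ) (start : Int) (visited : List Int) : Bool × List Int :=
  match fuel with
  | 0 => (false, visited)   -- unreachable: fuel never runs out (see pvSD lemmas)
  | fuel + 1 =>
      if start = target then (true, visited)
      else pvDfsListA adj target fuel (pvNbrs adj start) (PySem.Set.add visited start)
termination_by (fuel, 0)

def pvDfsListA (adj : List (Int × List Int)) (target : Int) (fuel : ℕ) (ns : List Int) (visited : List Int) : Bool × List Int :=
  match ns with
  | [] => (false, visited)
  | n :: ns =>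
      if n ∈ visited then pvDfsListA adj target fuel ns visited
      else
        match pvDfsA adj target fuel n visited with
        | (true, vis') => (true, vis')
        | (false, vis') => pvDfsListA adj target fuel ns vis'
termination_by (fuel, ns.length + 1)
end

def are_reachable (adj_list : List (Int × List Int)) (v : Int) (u : Int) : Bool :=
  let reachable_from_v := (pvDfsA adj_list u (adj_list.length + 1) v PySem.Set.empty).1
  let reachable_from_u := (pvDfsA adj_list v (adj_list.length + 1) u PySem.Set.empty).1
  reachable_from_v && reachable_from_u

-- ===== PORT B =====
-- stack with head = top (Python appends/pops at the end): pushing the not-yet-visited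
-- neighbours in order is a left fold consing onto the stack
def pvPush (visited stack ns : List Int) : List Int :=
  ns.foldl (fun st nb => if nb ∈ visited then st else nb :: st) stack

-- the while-loop of B's `reachable`, with fuel making it structural (never exhausted:
-- each iteration pops, and a node is expanded at most once; see pvLoopB_spec)
def pvLoopB (adj : List (Int × List Int)) (target : Int) : ℕ → List Int → List Int → Bool
  | _, [], _ => false
  | 0, _ :: _, _ => false   -- unreachable: fuel never runs out
  | fuel + 1, node :: rest, visited =>
      if node = target then true
      else if node ∈ visited then pvLoopB adj target fuel rest visited
      else
        let visited' := PySem.Set.add visited node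
        pvLoopB adj target fuel (pvPush visited' rest (pvNbrs adj node)) visited'

def pvMaxAdj (adj : List (Int × List Int)) : ℕ :=
  adj.foldr (fun p m => max p.2.length m) 0

def pvFuelB (adj : List (Int × List Int)) : ℕ :=
  (pvMaxAdj adj + 1) * adj.length + 2

def are_reachable_alt (adj_list : List (Int × List Int)) (v : Int) (u : Int) : Bool :=
  pvLoopB adj_list u (pvFuelB adj_list) [v] PySem.Set.empty &&
  pvLoopB adj_list v (pvFuelB adj_list) [u] PySem.Set.empty

-- ===== PRECONDITION & SPEC =====
def Spec_are_reachable (adj_list : List (Int × List Int)) (v : Int) (u : Int) (out : Bool) : Prop := out = are_reachable_alt adj_list v u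
instance (adj_list : List (Int × List Int)) (v : Int) (u : Int) (out : Bool) : Decidable (Spec_are_reachable adj_list v u out) := by unfold Spec_are_reachable; infer_instance

-- ===== CLAIM (what is proved, stated in full; the proofs are below) =====
def Claim_equal_are_reachable : Prop := ∀ (adj_list : List (Int × List Int)) (v : Int) (u : Int), Dom_are_reachable adj_list v u → Spec_are_reachable adj_list v u (are_reachable adj_list v u)

-- ===== LEMMAS AND PROOFS =====

-- reachability avoiding the visited set: the common mathematical meaning of both loops
def pvEdge (adj : List (Int × List Int)) (V : List Int) (a b : Int) : Prop :=
  a ∉ V ∧ b ∈ pvNbrs adj a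

def pvRA (adj : List (Int × List Int)) (V : List Int) (a b : Int) : Prop :=
  Relation.ReflTransGen (pvEdge adj V) a b

-- number of distinct keys not yet visited (the termination measure)
def pvCU (adj : List (Int × List Int)) (V : List Int) : ℕ :=
  ((PySem.List.dedup (adj.map Prod.fst)).filter (fun k => decide (k ∉ V))).length

lemma pvNbrs_nil (s : Int) : pvNbrs [] s = [] := rfl

lemma pvNbrs_cons (k : Int) (w : List Int) (rest : List (Int × List Int)) (s : Int) :
    pvNbrs ((k, w) :: rest) s = if k = s then w else pvNbrs rest s := by
  rw [show pvNbrs ((k, w) :: rest) s = (PySem.Dict.mk ((k, w) :: rest)).getD s [] from rfl,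
      PySem.Dict.getD_eq_get?_getD, PySem.Dict.get?_mk_cons]
  simp only [beq_iff_eq]
  split_ifs with h
  · rfl
  · rw [show pvNbrs rest s = (PySem.Dict.mk rest).getD s [] from rfl, PySem.Dict.getD_eq_get?_getD]

lemma pvNbrs_key {adj : List (Int × List Int)} {s : Int} (h : pvNbrs adj s ≠ []) :
    s ∈ adj.map Prod.fst := by
  induction adj with
  | nil => exact absurd rfl h
  | cons p rest ih =>
      obtain ⟨k, w⟩ := p
      rw [pvNbrs_cons] at h
      by_cases hk : k = s
      · simp [hk]
      · simp only [hk, if_false] at h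
        simp [ih h]

lemma pvNbrs_len (adj : List (Int × List Int)) (s : Int) :
    (pvNbrs adj s).length ≤ pvMaxAdj adj := by
  induction adj with
  | nil => simp [pvNbrs_nil, pvMaxAdj]
  | cons p rest ih =>
      obtain ⟨k, w⟩ := p
      rw [pvNbrs_cons]
      show _ ≤ max w.length (pvMaxAdj rest)
      split_ifs with h
      · exact le_max_left _ _
      · exact le_trans ih (le_max_right _ _)

lemma pvFilter_mono {V V' : List Int} (h : ∀ x ∈ V, x ∈ V') (l : List Int) :
    (l.filter fun k => decide (k ∉ V')).length ≤ (l.filter fun k => decide (k ∉ V)).length := by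
  induction l with
  | nil => simp
  | cons a l ih =>
      by_cases hV : a ∈ V
      · have hV' : a ∈ V' := h a hV
        simp only [List.filter_cons, hV, hV', not_true_eq_false, decide_false,
          Bool.false_eq_true, if_false]
        exact ih
      · by_cases hV' : a ∈ V'
        · simp only [List.filter_cons, hV, hV', not_true_eq_false, not_false_eq_true,
            decide_false, decide_true, Bool.false_eq_true, if_false, if_true, List.length_cons]
          omega
        · simp only [List.filter_cons, hV, hV', not_false_eq_true, decide_true, if_true,
            List.length_cons]
          omega

lemma pvCU_mono {adj : List (Int × List Int)} {V V' : List Int}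
    (h : ∀ x ∈ V, x ∈ V') : pvCU adj V' ≤ pvCU adj V :=
  pvFilter_mono h _

lemma pvCU_lt {adj : List (Int × List Int)} {V V' : List Int} {s : Int}
    (hk : s ∈ adj.map Prod.fst) (h1 : s ∉ V) (h2 : s ∈ V') (h : ∀ x ∈ V, x ∈ V') :
    pvCU adj V' < pvCU adj V := by
  unfold pvCU
  have hs : s ∈ PySem.List.dedup (adj.map Prod.fst) := by
    rw [PySem.List.mem_dedup]; exact hk
  generalize PySem.List.dedup (adj.map Prod.fst) = L at hs ⊢
  induction L with
  | nil => cases hs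
  | cons a l ih =>
      by_cases hsa : s = a
      · subst hsa
        simp only [List.filter_cons, h1, not_false_eq_true, decide_true,
          if_true, h2, not_true_eq_false, decide_false, Bool.false_eq_true, if_false,
          List.length_cons]
        have := pvFilter_mono (V := V) (V' := V') h l
        omega
      · have hs' : s ∈ l := by cases hs with
          | head => exact absurd rfl hsa
          | tail _ h => exact h
        have hlt := ih hs'
        by_cases hV : a ∈ V
        · have hV' : a ∈ V' := h a hV
          simp only [List.filter_cons, hV, hV', not_true_eq_false, decide_false,
            Bool.false_eq_true, if_false]
          exact hlt
        · by_cases hV' : a ∈ V'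
          · simp only [List.filter_cons, hV, hV', not_true_eq_false, not_false_eq_true,
              decide_false, decide_true, Bool.false_eq_true, if_false, if_true, List.length_cons]
            omega
          · simp only [List.filter_cons, hV, hV', not_false_eq_true, decide_true, if_true,
              List.length_cons]
            omega

lemma pvFoldlAdd_len (xs st : List Int) :
    (xs.foldl PySem.Set.add st).length ≤ st.length + xs.length := by
  induction xs generalizing st with
  | nil => simp
  | cons a xs ih =>
      simp only [List.foldl_cons]
      refine le_trans (ih _) ?_
      have : (PySem.Set.add st a).length ≤ st.length + 1 := by
        unfold PySem.Set.add
        split_ifs <;> simp <;> omega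
      simp only [List.length_cons]
      omega

lemma pvCU_le_len (adj : List (Int × List Int)) (V : List Int) :
    pvCU adj V ≤ adj.length := by
  unfold pvCU
  refine le_trans (List.length_filter_le _ _) ?_
  rw [PySem.List.dedup_eq_ofList, PySem.Set.ofList_eq_foldl]
  have := pvFoldlAdd_len (adj.map Prod.fst) []
  simp only [List.length_nil, Nat.zero_add, List.length_map] at this
  exact this

lemma pvRA_mono {adj : List (Int × List Int)} {V V' : List Int} {a b : Int}
    (h : ∀ x ∈ V, x ∈ V') (hr : pvRA adj V' a b) : pvRA adj V a b := by
  refine Relation.ReflTransGen.mono ?_ hr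
  intro a b hab
  exact ⟨fun hm => hab.1 (h a hm), hab.2⟩

lemma pvRA_of_mem {adj : List (Int × List Int)} {V : List Int} {a b : Int}
    (ha : a ∈ V) (hr : pvRA adj V a b) : a = b := by
  rcases hr.cases_head with h | ⟨c, hc, _⟩
  · exact h
  · exact absurd ha hc.1

-- splitting a path from `start` at its first step, with `start` added to the visited set
lemma pvRA_start_split {adj : List (Int × List Int)} {V V' : List Int} {start x : Int}
    (hV' : ∀ y, y ∈ V' ↔ y ∈ V ∨ y = start)
    (h : pvRA adj V start x) :
    x = start ∨ ∃ n ∈ pvNbrs adj start, pvRA adj V' n x := by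
  have key : ∀ a, pvRA adj V a x →
      pvRA adj V' a x ∨ (x = start ∨ ∃ n ∈ pvNbrs adj start, pvRA adj V' n x) := by
    intro a ha
    induction ha using Relation.ReflTransGen.head_induction_on with
    | refl => exact Or.inl Relation.ReflTransGen.refl
    | head hab htail ih =>
        rename_i a c
        rcases ih with ih | ih
        · by_cases hax : a = start
          · subst hax
            exact Or.inr (Or.inr ⟨c, hab.2, ih⟩)
          · refine Or.inl (Relation.ReflTransGen.head ⟨?_, hab.2⟩ ih)
            intro hmem
            rcases (hV' a).1 hmem with hm | hm
            · exact hab.1 hm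
            · exact hax hm
        · exact Or.inr ih
  rcases key start h with hk | hk
  · have : start ∈ V' := (hV' start).2 (Or.inr rfl)
    exact Or.inl ((pvRA_of_mem this hk).symm)
  · exact hk

-- avoiding one more vertex w: either the path already avoids it, or w itself reaches x
lemma pvRA_avoid {adj : List (Int × List Int)} {V V' : List Int} {w a x : Int}
    (hV' : ∀ y, y ∈ V' ↔ y ∈ V ∨ y = w)
    (h : pvRA adj V a x) : pvRA adj V' a x ∨ pvRA adj V w x := by
  induction h using Relation.ReflTransGen.head_induction_on with
  | refl => exact Or.inl Relation.ReflTransGen.refl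
  | head hab htail ih =>
      rename_i a c
      rcases ih with ih | ih
      · by_cases haw : a = w
        · subst haw
          exact Or.inr (Relation.ReflTransGen.head ⟨hab.1, hab.2⟩ htail)
        · refine Or.inl (Relation.ReflTransGen.head ⟨?_, hab.2⟩ ih)
          intro hmem
          rcases (hV' a).1 hmem with hm | hm
          · exact hab.1 hm
          · exact haw hm
      · exact Or.inr ih

-- closure transfer: if V1 = V ∪ {reachable from n avoiding V}, paths avoiding V either
-- avoid V1 or end inside V1
lemma pvRA_closure {adj : List (Int × List Int)} {V V1 : List Int} {n a x : Int}
    (hcl : ∀ y, y ∈ V1 ↔ y ∈ V ∨ pvRA adj V n y)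
    (h : pvRA adj V a x) : pvRA adj V1 a x ∨ x ∈ V1 := by
  induction h using Relation.ReflTransGen.head_induction_on with
  | refl => exact Or.inl Relation.ReflTransGen.refl
  | head hab htail ih =>
      rename_i a c
      rcases ih with ih | ih
      · by_cases ha1 : a ∈ V1
        · rcases (hcl a).1 ha1 with hm | hm
          · exact absurd hm hab.1
          · refine Or.inr ((hcl x).2 (Or.inr ?_))
            exact hm.trans (Relation.ReflTransGen.head hab htail)
        · exact Or.inl (Relation.ReflTransGen.head ⟨ha1, hab.2⟩ ih)
      · exact Or.inr ih

-- the spec of A's dfs at a given fuel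
def pvSD (adj : List (Int × List Int)) (target : Int) (fuel : ℕ) : Prop :=
  ∀ start V, target ∉ V → start ∉ V → pvCU adj V + 1 ≤ fuel →
    ((pvDfsA adj target fuel start V).1 = true ↔ pvRA adj V start target) ∧
    ((pvDfsA adj target fuel start V).1 = false →
      ∀ x, x ∈ (pvDfsA adj target fuel start V).2 ↔ x ∈ V ∨ pvRA adj V start x)

lemma pvSL {adj : List (Int × List Int)} {target : Int} {fuel : ℕ} (hSD : pvSD adj target fuel) :
    ∀ ns V, target ∉ V → pvCU adj V + 1 ≤ fuel →
      ((pvDfsListA adj target fuel ns V).1 = true ↔ ∃ n ∈ ns, pvRA adj V n target) ∧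
      ((pvDfsListA adj target fuel ns V).1 = false →
        ∀ x, x ∈ (pvDfsListA adj target fuel ns V).2 ↔ x ∈ V ∨ ∃ n ∈ ns, pvRA adj V n x) := by
  intro ns
  induction ns with
  | nil =>
      intro V ht hf
      constructor
      · simp [pvDfsListA]
      · intro _ x
        simp [pvDfsListA]
  | cons n ns ih =>
      intro V ht hf
      by_cases hn : n ∈ V
      · have heq : pvDfsListA adj target fuel (n :: ns) V = pvDfsListA adj target fuel ns V := by
          simp [pvDfsListA, hn]
        obtain ⟨ih1, ih2⟩ := ih V ht hf
        rw [heq]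
        constructor
        · rw [ih1]
          constructor
          · rintro ⟨k, hk, hrk⟩
            exact ⟨k, List.mem_cons_of_mem _ hk, hrk⟩
          · rintro ⟨k, hk, hrk⟩
            rcases List.mem_cons.1 hk with rfl | hk
            · exact absurd ((pvRA_of_mem hn hrk) ▸ hn) ht
            · exact ⟨k, hk, hrk⟩
        · intro hb x
          rw [ih2 hb x]
          constructor
          · rintro (hx | ⟨k, hk, hrk⟩)
            · exact Or.inl hx
            · exact Or.inr ⟨k, List.mem_cons_of_mem _ hk, hrk⟩
          · rintro (hx | ⟨k, hk, hrk⟩)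
            · exact Or.inl hx
            · rcases List.mem_cons.1 hk with rfl | hk
              · exact Or.inl ((pvRA_of_mem hn hrk) ▸ hn)
              · exact Or.inr ⟨k, hk, hrk⟩
      · rcases hA : pvDfsA adj target fuel n V with ⟨b1, W1⟩
        obtain ⟨sd1, sd2⟩ := hSD n V ht hn hf
        rw [hA] at sd1 sd2
        cases b1 with
        | true =>
            have heq : pvDfsListA adj target fuel (n :: ns) V = (true, W1) := by
              simp [pvDfsListA, hn, hA]
            rw [heq]
            refine ⟨⟨fun _ => ⟨n, List.mem_cons_self, sd1.1 rfl⟩, fun _ => rfl⟩, fun hb => absurd hb (by simp)⟩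
        | false =>
            have heq : pvDfsListA adj target fuel (n :: ns) V = pvDfsListA adj target fuel ns W1 := by
              simp [pvDfsListA, hn, hA]
            have hnot : ¬ pvRA adj V n target := fun h => by simpa using sd1.2 h
            have hchar : ∀ x, x ∈ W1 ↔ x ∈ V ∨ pvRA adj V n x := sd2 rfl
            have hsub : ∀ x ∈ V, x ∈ W1 := fun x hx => (hchar x).2 (Or.inl hx)
            have htW1 : target ∉ W1 := by
              intro hmem
              rcases (hchar target).1 hmem with h | h
              · exact ht h
              · exact hnot h
            have hfW1 : pvCU adj W1 + 1 ≤ fuel := le_trans (by have := pvCU_mono (adj := adj) hsub; omega) hf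
            obtain ⟨ih1, ih2⟩ := ih W1 htW1 hfW1
            have hup : ∀ k x, pvRA adj V k x → pvRA adj W1 k x ∨ x ∈ W1 :=
              fun k x h => pvRA_closure hchar h
            have hdn : ∀ k x, pvRA adj W1 k x → pvRA adj V k x :=
              fun k x h => pvRA_mono hsub h
            rw [heq]
            constructor
            · rw [ih1]
              constructor
              · rintro ⟨k, hk, hrk⟩
                exact ⟨k, List.mem_cons_of_mem _ hk, hdn _ _ hrk⟩
              · rintro ⟨k, hk, hrk⟩
                rcases List.mem_cons.1 hk with rfl | hk
                · exact absurd hrk hnot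
                · rcases hup k target hrk with h | h
                  · exact ⟨k, hk, h⟩
                  · exact absurd h htW1
            · intro hb x
              rw [ih2 hb x]
              constructor
              · rintro (hx | ⟨k, hk, hrk⟩)
                · rcases (hchar x).1 hx with h | h
                  · exact Or.inl h
                  · exact Or.inr ⟨n, List.mem_cons_self, h⟩
                · exact Or.inr ⟨k, List.mem_cons_of_mem _ hk, hdn _ _ hrk⟩
              · rintro (hx | ⟨k, hk, hrk⟩)
                · exact Or.inl (hsub x hx)
                · rcases List.mem_cons.1 hk with rfl | hk
                  · exact Or.inl ((hchar x).2 (Or.inr hrk))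
                  · rcases hup k x hrk with h | h
                    · exact Or.inr ⟨k, hk, h⟩
                    · exact Or.inl h

lemma pvSD_all (adj : List (Int × List Int)) (target : Int) (fuel : ℕ) : pvSD adj target fuel := by
  induction fuel with
  | zero =>
      intro start V ht hs hf
      exact absurd hf (by omega)
  | succ f ihf =>
      intro start V ht hs hf
      by_cases hst : start = target
      · have heq : pvDfsA adj target (f + 1) start V = (true, V) := by
          simp [pvDfsA, hst]
        rw [heq]
        refine ⟨⟨fun _ => hst ▸ Relation.ReflTransGen.refl, fun _ => rfl⟩, fun hb => absurd hb (by simp)⟩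
      · have heq : pvDfsA adj target (f + 1) start V =
            pvDfsListA adj target f (pvNbrs adj start) (PySem.Set.add V start) := by
          simp [pvDfsA, hst]
        have hmemV1 : ∀ y, y ∈ PySem.Set.add V start ↔ y ∈ V ∨ y = start :=
          fun y => PySem.Set.mem_add V start y
        have htV1 : target ∉ PySem.Set.add V start := by
          intro h
          rcases (hmemV1 target).1 h with h | h
          · exact ht h
          · exact hst h.symm
        cases h0 : pvNbrs adj start with
        | nil =>
            have heq2 : pvDfsListA adj target f [] (PySem.Set.add V start) =
                (false, PySem.Set.add V start) := by simp [pvDfsListA]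
            rw [heq, h0, heq2]
            have hnr : ¬ pvRA adj V start target := by
              intro hr
              rcases hr.cases_head with h | ⟨c, hc, _⟩
              · exact hst h
              · have hc2 := hc.2
                rw [h0] at hc2
                cases hc2
            constructor
            · exact ⟨fun h => absurd h (by simp), fun h => absurd h hnr⟩
            · intro _ x
              rw [hmemV1 x]
              constructor
              · rintro (hx | rfl)
                · exact Or.inl hx
                · exact Or.inr Relation.ReflTransGen.refl
              · rintro (hx | hr)
                · exact Or.inl hx
                · rcases hr.cases_head with h | ⟨c, hc, _⟩
                  · exact Or.inr h.symm
                  · have hc2 := hc.2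
                    rw [h0] at hc2
                    cases hc2
        | cons m ms =>
            have hkey : start ∈ adj.map Prod.fst := pvNbrs_key (by rw [h0]; simp)
            have hsV1 : start ∈ PySem.Set.add V start := (hmemV1 start).2 (Or.inr rfl)
            have hsubV1 : ∀ x ∈ V, x ∈ PySem.Set.add V start :=
              fun x hx => (hmemV1 x).2 (Or.inl hx)
            have hfV1 : pvCU adj (PySem.Set.add V start) + 1 ≤ f := by
              have := pvCU_lt hkey hs hsV1 hsubV1
              omega
            obtain ⟨l1, l2⟩ := pvSL ihf (pvNbrs adj start) (PySem.Set.add V start) htV1 hfV1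
            rw [heq]
            have hiff : pvRA adj V start target ↔
                ∃ n ∈ pvNbrs adj start, pvRA adj (PySem.Set.add V start) n target := by
              constructor
              · intro hr
                rcases pvRA_start_split hmemV1 hr with h | h
                · exact absurd h.symm hst
                · exact h
              · rintro ⟨n, hn, hrn⟩
                exact Relation.ReflTransGen.head ⟨hs, hn⟩ (pvRA_mono hsubV1 hrn)
            constructor
            · rw [l1, hiff]
            · intro hb x
              rw [l2 hb x, hmemV1 x]
              constructor
              · rintro ((hx | rfl) | ⟨n, hn, hrn⟩)
                · exact Or.inl hx
                · exact Or.inr Relation.ReflTransGen.refl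
                · exact Or.inr (Relation.ReflTransGen.head ⟨hs, hn⟩ (pvRA_mono hsubV1 hrn))
              · rintro (hx | hr)
                · exact Or.inl (Or.inl hx)
                · rcases pvRA_start_split hmemV1 hr with h | ⟨n, hn, hrn⟩
                  · exact Or.inl (Or.inr h)
                  · exact Or.inr ⟨n, hn, hrn⟩

lemma pvPush_len (V st ns : List Int) : (pvPush V st ns).length ≤ st.length + ns.length := by
  unfold pvPush
  induction ns generalizing st with
  | nil => simp
  | cons a ns ih =>
      simp only [List.foldl_cons]
      refine le_trans (ih _) ?_
      split_ifs <;> simp <;> omega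

lemma pvPush_mem (V st ns : List Int) (x : Int) :
    x ∈ pvPush V st ns ↔ x ∈ st ∨ (x ∈ ns ∧ x ∉ V) := by
  unfold pvPush
  induction ns generalizing st with
  | nil => simp
  | cons a ns ih =>
      simp only [List.foldl_cons]
      rw [ih]
      split_ifs with ha
      · constructor
        · rintro (h | h)
          · exact Or.inl h
          · exact Or.inr ⟨List.mem_cons_of_mem _ h.1, h.2⟩
        · rintro (h | ⟨h1, h2⟩)
          · exact Or.inl h
          · rcases List.mem_cons.1 h1 with rfl | h1
            · exact absurd ha h2
            · exact Or.inr ⟨h1, h2⟩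
      · constructor
        · rintro (h | h)
          · rcases List.mem_cons.1 h with rfl | h
            · exact Or.inr ⟨List.mem_cons_self, ha⟩
            · exact Or.inl h
          · exact Or.inr ⟨List.mem_cons_of_mem _ h.1, h.2⟩
        · rintro (h | ⟨h1, h2⟩)
          · exact Or.inl (List.mem_cons_of_mem _ h)
          · rcases List.mem_cons.1 h1 with rfl | h1
            · exact Or.inl List.mem_cons_self
            · exact Or.inr ⟨h1, h2⟩

lemma pvLoopB_spec (adj : List (Int × List Int)) (target : Int) :
    ∀ fuel stack V, target ∉ V →
      (pvMaxAdj adj + 1) * pvCU adj V + stack.length + 1 ≤ fuel →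
      (pvLoopB adj target fuel stack V = true ↔ ∃ n ∈ stack, pvRA adj V n target) := by
  intro fuel
  induction fuel with
  | zero =>
      intro stack V ht hf
      cases stack with
      | nil => simp [pvLoopB]
      | cons a r =>
          exfalso
          simp only [List.length_cons] at hf
          omega
  | succ f ih =>
      intro stack V ht hf
      cases stack with
      | nil => simp [pvLoopB]
      | cons node rest =>
          by_cases hnt : node = target
          · have heq : pvLoopB adj target (f + 1) (node :: rest) V = true := by
              simp [pvLoopB, hnt]
            rw [heq]
            exact ⟨fun _ => ⟨node, List.mem_cons_self, hnt ▸ Relation.ReflTransGen.refl⟩,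
              fun _ => rfl⟩
          · by_cases hnv : node ∈ V
            · have heq : pvLoopB adj target (f + 1) (node :: rest) V =
                  pvLoopB adj target f rest V := by simp [pvLoopB, hnt, hnv]
              have hf' : (pvMaxAdj adj + 1) * pvCU adj V + rest.length + 1 ≤ f := by
                simp only [List.length_cons] at hf
                omega
              rw [heq, ih rest V ht hf']
              constructor
              · rintro ⟨n, hn, hrn⟩
                exact ⟨n, List.mem_cons_of_mem _ hn, hrn⟩
              · rintro ⟨n, hn, hrn⟩
                rcases List.mem_cons.1 hn with rfl | hn
                · exact absurd (pvRA_of_mem hnv hrn) hnt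
                · exact ⟨n, hn, hrn⟩
            · have hmem' : ∀ y, y ∈ PySem.Set.add V node ↔ y ∈ V ∨ y = node :=
                fun y => PySem.Set.mem_add V node y
              have htV' : target ∉ PySem.Set.add V node := by
                intro h
                rcases (hmem' target).1 h with h | h
                · exact ht h
                · exact hnt h.symm
              have hsub : ∀ x ∈ V, x ∈ PySem.Set.add V node :=
                fun x hx => (hmem' x).2 (Or.inl hx)
              have hnV' : node ∈ PySem.Set.add V node := (hmem' node).2 (Or.inr rfl)
              have hlen := pvPush_len (PySem.Set.add V node) rest (pvNbrs adj node)
              have hf' : (pvMaxAdj adj + 1) * pvCU adj (PySem.Set.add V node) +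
                  (pvPush (PySem.Set.add V node) rest (pvNbrs adj node)).length + 1 ≤ f := by
                simp only [List.length_cons] at hf
                by_cases hkey : pvNbrs adj node = []
                · have hle := pvCU_mono (adj := adj) hsub
                  have hmul : (pvMaxAdj adj + 1) * pvCU adj (PySem.Set.add V node) ≤
                      (pvMaxAdj adj + 1) * pvCU adj V :=
                    Nat.mul_le_mul_left _ hle
                  rw [hkey] at hlen ⊢
                  simp only [List.length_nil] at hlen
                  omega
                · have hk : node ∈ adj.map Prod.fst := pvNbrs_key hkey
                  have hlt := pvCU_lt hk hnv hnV' hsub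
                  have hK := pvNbrs_len adj node
                  have hmul : (pvMaxAdj adj + 1) * (pvCU adj (PySem.Set.add V node) + 1) ≤
                      (pvMaxAdj adj + 1) * pvCU adj V :=
                    Nat.mul_le_mul_left _ (by omega)
                  rw [Nat.mul_add, Nat.mul_one] at hmul
                  omega
              have heq : pvLoopB adj target (f + 1) (node :: rest) V =
                  pvLoopB adj target f (pvPush (PySem.Set.add V node) rest (pvNbrs adj node))
                    (PySem.Set.add V node) := by simp [pvLoopB, hnt, hnv]
              rw [heq, ih _ _ htV' hf']
              have hnode : pvRA adj V node target →
                  ∃ k ∈ pvPush (PySem.Set.add V node) rest (pvNbrs adj node),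
                    pvRA adj (PySem.Set.add V node) k target := by
                intro hr
                rcases pvRA_start_split hmem' hr with h | ⟨nb, hnb, hrb⟩
                · exact absurd h.symm hnt
                · have hnbV' : nb ∉ PySem.Set.add V node := by
                    intro hm
                    exact htV' ((pvRA_of_mem hm hrb) ▸ hm)
                  exact ⟨nb, (pvPush_mem _ _ _ nb).2 (Or.inr ⟨hnb, hnbV'⟩), hrb⟩
              constructor
              · rintro ⟨n, hn, hrn⟩
                rcases (pvPush_mem _ _ _ n).1 hn with h | ⟨h1, h2⟩
                · exact ⟨n, List.mem_cons_of_mem _ h, pvRA_mono hsub hrn⟩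
                · exact ⟨node, List.mem_cons_self,
                    Relation.ReflTransGen.head ⟨hnv, h1⟩ (pvRA_mono hsub hrn)⟩
              · rintro ⟨n, hn, hrn⟩
                rcases List.mem_cons.1 hn with rfl | hn
                · exact hnode hrn
                · rcases pvRA_avoid hmem' hrn with h | h
                  · exact ⟨n, (pvPush_mem _ _ _ n).2 (Or.inl hn), h⟩
                  · exact hnode h

lemma pvReach_eq (adj : List (Int × List Int)) (start target : Int) :
    (pvDfsA adj target (adj.length + 1) start PySem.Set.empty).1 =
    pvLoopB adj target (pvFuelB adj) [start] PySem.Set.empty := by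
  have hemp : (PySem.Set.empty : List Int) = [] := rfl
  have h1 := (pvSD_all adj target (adj.length + 1) start [] (by simp) (by simp)
    (by have := pvCU_le_len adj []; omega)).1
  have hfB : (pvMaxAdj adj + 1) * pvCU adj [] + [start].length + 1 ≤ pvFuelB adj := by
    have hle : pvCU adj [] ≤ adj.length := pvCU_le_len adj []
    have hmul : (pvMaxAdj adj + 1) * pvCU adj [] ≤ (pvMaxAdj adj + 1) * adj.length :=
      Nat.mul_le_mul_left _ hle
    unfold pvFuelB
    simp only [List.length_cons, List.length_nil]
    omega
  have h2 := pvLoopB_spec adj target (pvFuelB adj) [start] [] (by simp) hfB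
  have h3 : ((pvDfsA adj target (adj.length + 1) start [] ).1 = true ↔
      pvLoopB adj target (pvFuelB adj) [start] [] = true) := by
    rw [h1, h2]
    constructor
    · intro hr
      exact ⟨start, List.mem_cons_self, hr⟩
    · rintro ⟨n, hn, hrn⟩
      rcases List.mem_cons.1 hn with rfl | hn
      · exact hrn
      · cases hn
  rw [hemp]
  exact Bool.coe_iff_coe.mp h3

-- ===== VERDICT (by name: the statement is the Claim_ definition above) =====
theorem are_reachable_spec : Claim_equal_are_reachable := by
  intro adj v u _
  unfold Spec_are_reachable are_reachable are_reachable_alt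
  rw [pvReach_eq adj v u, pvReach_eq adj u v]
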